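-- pv_equiv track=rewrite | github.com/Mo-Faraan/hatio | Csv_Verification/Csv_Verification.py | ValidFileFormat
-- ===== SOURCE A (Python) =====
-- def ExtractVars(format):
--     extracted = []
--     temp = ""
--     flag = False
--
--     for i in format:
--         if i=="%":
--             if (flag==True):
--                 extracted.append(temp)
--             flag = not flag
--             temp=""
--         elif (flag==True):
--                 temp+=i
--
--     return extracted
--
-- def ValidFileFormat(format):
--     extracted = ExtractVars(format)
--     validVars = ["billerid", "date","date(ddMMyyyy)", "ouId"]
--     l=[]
--     c = format.count("%")
--
--     if (c%2 != 0):
--         return False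
--
--     for i in extracted:
--          if i not in validVars:
--               return False
-- ===== SOURCE B (Python) =====
-- def ValidFileFormat(format):
--     parts = format.split("%")
--     if len(parts) % 2 == 0:
--         return False
--     validVars = ["billerid", "date", "date(ddMMyyyy)", "ouId"]
--     for tok in parts[1::2]:
--         if tok not in validVars:
--             return False
-- ===== Notes on version B (the rewrite author's own statement) =====
-- stated objective: simpler
-- what changed: Replaced the character-by-character flag/temp state machine with str.split on the percent delimiter plus taking the odd-indexed pieces; the parity guard becomes a length check on the split, and the implicit None return in the valid case is preserved.
import Mathlib
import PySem

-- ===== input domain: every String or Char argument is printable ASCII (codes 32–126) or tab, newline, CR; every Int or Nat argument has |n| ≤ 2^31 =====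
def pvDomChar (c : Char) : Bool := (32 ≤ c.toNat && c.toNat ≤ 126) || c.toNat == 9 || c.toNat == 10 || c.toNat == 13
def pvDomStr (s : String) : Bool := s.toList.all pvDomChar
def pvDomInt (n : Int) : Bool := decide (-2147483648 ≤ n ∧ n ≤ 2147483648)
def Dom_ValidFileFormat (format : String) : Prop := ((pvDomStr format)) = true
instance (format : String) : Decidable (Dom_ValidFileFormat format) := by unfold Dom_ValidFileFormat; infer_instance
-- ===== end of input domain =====

-- B replaces A's character-level flag/temp state machine by split('%') + odd-indexed pieces (simpler); both keep the implicit None in the valid case.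

-- ===== PORT A =====
-- the for-loop of ExtractVars, state (extracted, temp, flag); temp kept as List Char ('temp += i' is 'temp ++ [i]')
def ExtractVarsLoop : List Char → List String → List Char → Bool → List String
  | [], extracted, _, _ => extracted
  | i :: rest, extracted, temp, flag =>
    if i = '%' then
      ExtractVarsLoop rest (if flag then extracted ++ [String.ofList temp] else extracted) [] (!flag)
    else if flag then ExtractVarsLoop rest extracted (temp ++ [i]) flag
    else ExtractVarsLoop rest extracted temp flag

def ExtractVars (format : String) : List String :=
  ExtractVarsLoop format.toList [] [] false

-- the 'for i in extracted' loop with its early 'return False'; falling off the end is none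
def checkVarsA : List String → List String → Option Bool
  | [], _ => none
  | i :: rest, validVars => if i ∈ validVars then checkVarsA rest validVars else some false

def ValidFileFormat (format : String) : Option Bool :=
  let extracted := ExtractVars format
  let validVars := ["billerid", "date", "date(ddMMyyyy)", "ouId"]
  let c := PySem.Str.count format "%"
  if c % 2 ≠ 0 then some false
  else checkVarsA extracted validVars

-- ===== PORT B =====
-- exact hand port of xs[1::2] (step 2 from index 1): the elements at odd indices
def oddSlots {α : Type} : List α → List α
  | _ :: b :: rest => b :: oddSlots rest
  | _ => []

-- the 'for tok in parts[1::2]' loop of Source B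
def checkVarsB : List String → Option Bool
  | [] => none
  | t :: rest =>
    if t ∈ ["billerid", "date", "date(ddMMyyyy)", "ouId"] then checkVarsB rest else some false

def ValidFileFormat_alt (format : String) : Option Bool :=
  match PySem.Str.split? format "%" with
  | none => none  -- unreachable: the separator "%" is nonempty
  | some parts =>
    if parts.length % 2 == 0 then some false
    else checkVarsB (oddSlots parts)

-- ===== PRECONDITION & SPEC =====
def Spec_ValidFileFormat (format : String) (out : Option Bool) : Prop := out = ValidFileFormat_alt format
instance (format : String) (out : Option Bool) : Decidable (Spec_ValidFileFormat format out) := by unfold Spec_ValidFileFormat; infer_instance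

-- ===== CLAIM (what is proved, stated in full; the proofs are below) =====
def Claim_equal_ValidFileFormat : Prop := ∀ (format : String), Dom_ValidFileFormat format → Spec_ValidFileFormat format (ValidFileFormat format)

-- ===== LEMMAS AND PROOFS =====

-- simple structural splitting of a char list on '%'
def sSplit : List Char → List (List Char)
  | [] => [[]]
  | c :: t =>
    if c = '%' then [] :: sSplit t
    else match sSplit t with
      | p :: ps => (c :: p) :: ps
      | [] => [[c]]

theorem sSplit_ne_nil (l : List Char) : sSplit l ≠ [] := by
  induction l with
  | nil => simp [sSplit]
  | cons c t ih =>
    simp only [sSplit]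
    split
    · simp
    · cases h : sSplit t with
      | nil => simp
      | cons p ps => simp [h]

theorem sSplit_length (l : List Char) : (sSplit l).length = l.count '%' + 1 := by
  induction l with
  | nil => simp [sSplit]
  | cons c t ih =>
    simp only [sSplit]
    by_cases hc : c = '%'
    · simp [hc, ih]
    · simp only [if_neg hc]
      cases h : sSplit t with
      | nil => exact absurd h (sSplit_ne_nil t)
      | cons p ps =>
        have := ih
        rw [h] at this
        simp [hc, ← this]

theorem countGo_eq (l : List Char) : ∀ (fuel : Nat) (acc : Nat), l.length ≤ fuel →
    PySem.Chars.count.go ['%'] fuel l acc = acc + l.count '%' := by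
  induction l with
  | nil =>
    intro fuel acc _
    cases fuel <;> simp [PySem.Chars.count.go]
  | cons c t ih =>
    intro fuel acc hle
    cases fuel with
    | zero => simp at hle
    | succ f =>
      rw [PySem.Chars.count.go]
      by_cases hc : c = '%'
      · simp only [hc, List.isPrefixOf]
        rw [if_pos (by simp)]
        simp only [List.length_cons, List.drop_succ_cons, List.length_nil, List.drop_zero]
        rw [ih f (acc + 1) (by simpa using hle)]
        simp
        omega
      · rw [if_neg (by simp [List.isPrefixOf, Ne.symm hc])]
        rw [ih f acc (by simpa using hle)]
        simp [hc]

theorem strCount_eq (format : String) :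
    PySem.Str.count format "%" = format.toList.count '%' := by
  rw [PySem.Str.count, show ("%" : String).toList = ['%'] from rfl, PySem.Chars.count]
  simp only [List.isEmpty_cons, Bool.false_eq_true, if_false]
  rw [countGo_eq _ _ _ le_rfl]
  simp

theorem splitGo_eq (l : List Char) : ∀ (fuel : Nat) (cur : List Char) (acc : List (List Char))
    (p : List Char) (ps : List (List Char)), sSplit l = p :: ps → l.length < fuel →
    PySem.Chars.splitOn.go ['%'] fuel l cur acc = acc.reverse ++ (cur.reverse ++ p) :: ps := by
  induction l with
  | nil =>
    intro fuel cur acc p ps hs hlt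
    cases fuel with
    | zero => omega
    | succ f =>
      simp [sSplit] at hs
      rw [PySem.Chars.splitOn.go]
      simp [← hs.1, ← hs.2]
      omega
  | cons c t ih =>
    intro fuel cur acc p ps hs hlt
    cases fuel with
    | zero => omega
    | succ f =>
      rw [PySem.Chars.splitOn.go]
      by_cases hc : c = '%'
      · rw [if_pos (by simp [List.isPrefixOf, hc])]
        simp only [sSplit, if_pos hc] at hs
        obtain ⟨p', ps', h'⟩ : ∃ p' ps', sSplit t = p' :: ps' := by
          cases h : sSplit t with
          | nil => exact absurd h (sSplit_ne_nil t)
          | cons a b => exact ⟨a, b, rfl⟩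
        rw [h'] at hs
        simp only [List.length_cons, List.drop_succ_cons, List.length_nil, List.drop_zero]
        rw [ih f [] (cur.reverse :: acc) p' ps' h' (by simp at hlt; omega)]
        cases hs
        simp
      · rw [if_neg (by simp [List.isPrefixOf, Ne.symm hc])]
        simp only [sSplit, if_neg hc] at hs
        obtain ⟨p', ps', h'⟩ : ∃ p' ps', sSplit t = p' :: ps' := by
          cases h : sSplit t with
          | nil => exact absurd h (sSplit_ne_nil t)
          | cons a b => exact ⟨a, b, rfl⟩
        rw [h'] at hs
        rw [ih f (c :: cur) acc p' ps' h' (by simp at hlt; omega)]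
        cases hs
        simp

theorem strSplit_eq (format : String) :
    PySem.Str.split? format "%" = some ((sSplit format.toList).map String.ofList) := by
  obtain ⟨p, ps, h⟩ : ∃ p ps, sSplit format.toList = p :: ps := by
    cases hh : sSplit format.toList with
    | nil => exact absurd hh (sSplit_ne_nil _)
    | cons a b => exact ⟨a, b, rfl⟩
  have hchars : PySem.Chars.split? format.toList ['%'] = some (sSplit format.toList) := by
    rw [PySem.Chars.split?]
    simp only [List.isEmpty_cons, Bool.false_eq_true, if_false]
    rw [PySem.Chars.splitOn]
    rw [splitGo_eq format.toList (format.toList.length + 1) [] [] p ps h (by omega)]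
    simp [← h]
  simp [PySem.Str.split?, show ("%" : String).toList = ['%'] from rfl, hchars]

-- the token stream ExtractVars produces, phrased over the split parts
-- (flag true: a token is being built, temp ++ current part; emitted only if more parts follow)
def gW (flag : Bool) (temp : List Char) : List (List Char) → List String
  | [] => []
  | p :: rest =>
    if flag then
      (if rest = [] then [] else String.ofList (temp ++ p) :: gW false [] rest)
    else gW true [] rest

theorem extractLoop_eq (l : List Char) : ∀ (ext : List String) (temp : List Char) (flag : Bool),
    ExtractVarsLoop l ext temp flag = ext ++ gW flag temp (sSplit l) := by
  induction l with
  | nil =>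
    intro ext temp flag
    cases flag <;> simp [ExtractVarsLoop, sSplit, gW]
  | cons c t ih =>
    intro ext temp flag
    by_cases hc : c = '%'
    · simp only [ExtractVarsLoop, sSplit, hc]
      cases flag with
      | false => simp [ih, gW]
      | true =>
        rw [ih]
        have hne := sSplit_ne_nil t
        simp [gW, hne]
    · simp only [ExtractVarsLoop, sSplit, if_neg hc]
      obtain ⟨p', ps', h'⟩ : ∃ p' ps', sSplit t = p' :: ps' := by
        cases h : sSplit t with
        | nil => exact absurd h (sSplit_ne_nil t)
        | cons a b => exact ⟨a, b, rfl⟩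
      rw [h']
      cases flag with
      | false => simp [ih, h', gW]
      | true =>
        rw [ih, h']
        simp [gW]

theorem gW_odd (ps : List (List Char)) (h : ps.length % 2 = 1) :
    gW false [] ps = (oddSlots ps).map String.ofList := by
  induction ps using oddSlots.induct with
  | case1 a b rest ih =>
    simp only [List.length_cons] at h
    by_cases hr : rest = []
    · subst hr; simp at h
    · simp [gW, oddSlots, hr, ih (by omega)]
  | case2 x hx =>
    cases x with
    | nil => simp at h
    | cons a t =>
      cases t with
      | nil => simp [gW, oddSlots]
      | cons b r => exact (hx a b r rfl).elim

theorem checkAB (xs : List String) :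
    checkVarsA xs ["billerid", "date", "date(ddMMyyyy)", "ouId"] = checkVarsB xs := by
  induction xs with
  | nil => rfl
  | cons a t ih => simp only [checkVarsA, checkVarsB, ih]

theorem oddSlots_map {α β : Type} (f : α → β) (xs : List α) :
    oddSlots (xs.map f) = (oddSlots xs).map f := by
  induction xs using oddSlots.induct with
  | case1 a b rest ih => simp [oddSlots, ih]
  | case2 x hx =>
    cases x with
    | nil => simp [oddSlots]
    | cons a t =>
      cases t with
      | nil => simp [oddSlots]
      | cons b r => exact (hx a b r rfl).elim

-- ===== VERDICT (by name: the statement is the Claim_ definition above) =====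
theorem ValidFileFormat_spec : Claim_equal_ValidFileFormat := by
  intro format _
  unfold Spec_ValidFileFormat ValidFileFormat ValidFileFormat_alt
  rw [strSplit_eq, strCount_eq]
  simp only [List.length_map, sSplit_length]
  set l := format.toList with hl
  by_cases hpar : l.count '%' % 2 = 0
  · rw [if_neg (by omega)]
    have hodd : (l.count '%' + 1) % 2 = 1 := by omega
    rw [if_neg (by simp; omega)]
    unfold ExtractVars
    rw [extractLoop_eq]
    simp only [List.nil_append]
    rw [gW_odd (sSplit l) (by rw [sSplit_length]; omega)]
    rw [oddSlots_map, checkAB]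
  · rw [if_pos (by omega)]
    rw [if_pos (by simp; omega)]
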